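-- pv_equiv track=rewrite | github.com/Zineddine-Tighidet/MemoReason | web/api/taxonomy.py | _split_markdown_row
-- ===== SOURCE A (Python) =====
-- def _split_markdown_row(row: str) -> list[str]:
--     """Split a markdown table row while preserving escaped pipes inside cells."""
--     row = row.strip()
--     if not row.startswith("|"):
--         return []
--     row = row[1:]
--     if row.endswith("|"):
--         row = row[:-1]
--
--     cells: list[str] = []
--     current: list[str] = []
--     escaped = False
--     for ch in row:
--         if escaped:
--             current.append(ch)
--             escaped = False
--             continue
--         if ch == "\\":
--             escaped = True
--             continue
--         if ch == "|":
--             cells.append("".join(current).strip())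
--             current = []
--         else:
--             current.append(ch)
--     if escaped:
--         current.append("\\")
--     cells.append("".join(current).strip())
--     return cells
-- ===== SOURCE B (Python) =====
-- def _unescape(cell: str) -> str:
--     """Resolve backslash escapes: '\\x' -> 'x', a trailing lone backslash stays."""
--     parts = cell.split("\\")
--     out = [parts[0]]
--     i = 1
--     while i < len(parts):
--         if parts[i] == "" and i + 1 < len(parts):
--             # '\\\\' pair: a literal backslash, then the following part verbatim
--             out.append("\\" + parts[i + 1])
--             i += 2
--         elif parts[i] == "" and i + 1 == len(parts):
--             # the cell ends with a lone backslash: keep it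
--             out.append("\\")
--             i += 1
--         else:
--             # the backslash escaped the first char of parts[i]: drop the backslash
--             out.append(parts[i])
--             i += 1
--     return "".join(out)
--
--
-- def _split_markdown_row(row: str) -> list[str]:
--     """Split a markdown table row while preserving escaped pipes inside cells."""
--     row = row.strip()
--     if not row.startswith("|"):
--         return []
--     row = row[1:]
--     if row.endswith("|"):
--         row = row[:-1]
--
--     # Stage 1: naive split on every pipe.
--     # Stage 2: re-join pieces separated by an ESCAPED pipe, i.e. whenever the
--     # piece before the pipe ends in an odd number of backslashes.
--     merged: list[str] = []
--     join_next = False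
--     for piece in row.split("|"):
--         if join_next:
--             merged[-1] = merged[-1] + "|" + piece
--         else:
--             merged.append(piece)
--         join_next = (len(piece) - len(piece.rstrip("\\"))) % 2 == 1
--     # Stage 3: unescape and strip each cell.
--     return [_unescape(cell).strip() for cell in merged]
-- ===== Notes on version B (the rewrite author's own statement) =====
-- stated objective: alternative
-- what changed: Replaces A's single-pass per-character escape-flag state machine by a staged pipeline: split the row naively on every '|', re-join adjacent pieces whenever the left piece ends in an odd number of backslashes (an escaped pipe), then run a separate unescape pass per cell built on split('\\').
import Mathlib
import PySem

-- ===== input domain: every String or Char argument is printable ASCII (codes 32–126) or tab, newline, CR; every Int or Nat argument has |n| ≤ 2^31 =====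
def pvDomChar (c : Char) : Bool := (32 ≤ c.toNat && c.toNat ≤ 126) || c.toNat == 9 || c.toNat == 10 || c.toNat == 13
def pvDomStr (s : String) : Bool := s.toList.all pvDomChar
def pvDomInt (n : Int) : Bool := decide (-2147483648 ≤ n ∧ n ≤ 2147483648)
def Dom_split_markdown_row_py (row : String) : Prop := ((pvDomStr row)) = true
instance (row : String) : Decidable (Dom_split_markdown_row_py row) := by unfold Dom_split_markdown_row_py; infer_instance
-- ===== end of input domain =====

-- B replaces A's per-character escape-flag state machine by a staged pipeline —
-- naive split on '|', re-merge at escaped pipes (odd trailing-backslash run), then a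
-- separate unescape pass per cell via split on '\' (objective: alternative).

-- ===== PORT A =====
-- one iteration of A's `for ch in row` loop over state (cells, current, escaped)
def pvAstep : (List String × List Char × Bool) → Char → (List String × List Char × Bool)
  | (cells, cur, escaped), ch =>
    if escaped then (cells, cur ++ [ch], false)
    else if ch = '\\' then (cells, cur, true)
    else if ch = '|' then (cells ++ [String.ofList (PySem.Chars.strip cur)], [], false)
    else (cells, cur ++ [ch], false)

def split_markdown_row_py (row : String) : List String :=
  let r0 := PySem.Chars.strip row.toList
  if !(PySem.Chars.startswith r0 ['|']) then []
  else
    let r1 := PySem.List.slice r0 (some 1) none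
    let r2 := if PySem.Chars.endswith r1 ['|'] then PySem.List.slice r1 none (some (-1)) else r1
    let st := r2.foldl pvAstep ([], [], false)
    let cur := if st.2.2 then st.2.1 ++ ['\\'] else st.2.1
    st.1 ++ [String.ofList (PySem.Chars.strip cur)]

-- ===== PORT B =====
-- `(len(piece) - len(piece.rstrip("\\"))) % 2 == 1` — the trailing-backslash count,
-- ported by hand as the length of the run of '\' at the end (exact: rstrip("\\")
-- removes exactly that run).
def pvOddTrail (piece : List Char) : Bool :=
  ((piece.reverse.takeWhile (fun c => c == '\\')).length) % 2 == 1

-- one iteration of B's merge loop over state (merged, join_next);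
-- `merged[-1] = merged[-1] + "|" + piece` ported via dropLast/getLastD (merged[-1] exists there)
def pvMergeStep : (List (List Char) × Bool) → List Char → (List (List Char) × Bool)
  | (merged, join), piece =>
    ((if join then merged.dropLast ++ [merged.getLastD [] ++ '|' :: piece]
      else merged ++ [piece]),
     pvOddTrail piece)

-- B's `_unescape` while-loop over parts[1:], one constructor case per branch
def pvUnescRest : List (List Char) → List Char
  | [] => []
  | [t] => if t = [] then ['\\'] else t
  | [] :: t :: rest => ('\\' :: t) ++ pvUnescRest rest
  | t :: rest => t ++ pvUnescRest rest

-- B's `_unescape`: cell.split("\\") (= List.splitOn, never []), then the join loop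
def pvUnesc (cell : List Char) : List Char :=
  match cell.splitOn '\\' with
  | [] => []
  | p :: rest => p ++ pvUnescRest rest

def split_markdown_row_py_alt (row : String) : List String :=
  let r0 := PySem.Chars.strip row.toList
  if !(PySem.Chars.startswith r0 ['|']) then []
  else
    let r1 := PySem.List.slice r0 (some 1) none
    let r2 := if PySem.Chars.endswith r1 ['|'] then PySem.List.slice r1 none (some (-1)) else r1
    let merged := ((r2.splitOn '|').foldl pvMergeStep ([], false)).1
    merged.map (fun cell => String.ofList (PySem.Chars.strip (pvUnesc cell)))

-- ===== PRECONDITION & SPEC =====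
def Spec_split_markdown_row_py (row : String) (out : List String) : Prop := out = split_markdown_row_py_alt row
instance (row : String) (out : List String) : Decidable (Spec_split_markdown_row_py row out) := by unfold Spec_split_markdown_row_py; infer_instance

-- ===== CLAIM (what is proved, stated in full; the proofs are below) =====
def Claim_equal_split_markdown_row_py : Prop := ∀ (row : String), Dom_split_markdown_row_py row → Spec_split_markdown_row_py row (split_markdown_row_py row)

-- ===== LEMMAS AND PROOFS =====

-- reference scanner: chars produced inside one escape-aware pass, plus the dangling-escape flag
def pvScan : List Char → List Char × Bool
  | [] => ([], false)
  | ['\\'] => ([], true)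
  | '\\' :: c :: t => let r := pvScan t; (c :: r.1, r.2)
  | c :: t => let r := pvScan t; (c :: r.1, r.2)

-- reference unescape: like pvScan but keeping a dangling '\' literally
def pvUref : List Char → List Char
  | [] => []
  | ['\\'] => ['\\']
  | '\\' :: c :: t => c :: pvUref t
  | c :: t => c :: pvUref t

-- "no free pipe": every '|' occurs as the escaped char of a pair
def pvNfp : List Char → Bool
  | [] => true
  | ['\\'] => true
  | '\\' :: _ :: t => pvNfp t
  | c :: t => (c != '|') && pvNfp t

-- reference cell scanner (pvBtake: one cell up to the first unescaped '|'; pvBcells: all cells)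
def pvBtake : List Char → List Char × Option (List Char)
  | [] => ([], none)
  | '|' :: t => ([], some t)
  | '\\' :: c :: t => let r := pvBtake t; (c :: r.1, r.2)
  | c :: t => let r := pvBtake t; (c :: r.1, r.2)

lemma pvBtake_rest_lt : ∀ s t : List Char, (pvBtake s).2 = some t → t.length < s.length := by
  intro s
  fun_induction pvBtake s with
  | case1 => intro t h; simp at h
  | case2 t => intro u h; simp at h; simp [h]
  | case3 c t r ih => intro u h; have := ih u (by simpa [r] using h); simp; omega
  | case4 c t h1 h2 r ih => intro u h; have := ih u (by simpa [r] using h); simpa using Nat.lt_succ_of_lt this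

def pvBcells (s : List Char) : List String :=
  String.ofList (PySem.Chars.strip (pvBtake s).1) ::
    (match _h : (pvBtake s).2 with
     | none => []
     | some t => pvBcells t)
termination_by s.length
decreasing_by exact pvBtake_rest_lt s t _h

-- merge loop as structural recursion on the pieces
def pvMergeRec (acc : List Char) : List (List Char) → List (List Char)
  | [] => [acc]
  | q :: rest =>
    if pvOddTrail acc then pvMergeRec (acc ++ '|' :: q) rest
    else acc :: pvMergeRec q rest

-- ---------- A-side: A's foldl equals pvBcells ----------

lemma pvBcells_eq (s : List Char) :
    pvBcells s = String.ofList (PySem.Chars.strip (pvBtake s).1) ::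
      (match (pvBtake s).2 with | none => [] | some t => pvBcells t) := by
  rw [pvBcells.eq_def]
  split <;> rename_i h2 <;> (split <;> simp_all)

lemma pvAstep_pipe (cells : List String) (cur : List Char) :
    pvAstep (cells, cur, false) '|' = (cells ++ [String.ofList (PySem.Chars.strip cur)], [], false) := rfl

lemma pvAstep_backslash (cells : List String) (cur : List Char) :
    pvAstep (cells, cur, false) '\\' = (cells, cur, true) := rfl

lemma pvAstep_escaped (cells : List String) (cur : List Char) (c : Char) :
    pvAstep (cells, cur, true) c = (cells, cur ++ [c], false) := rfl

lemma pvAstep_other (cells : List String) (cur : List Char) (c : Char)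
    (hp : c ≠ '|') (hb : c ≠ '\\') : pvAstep (cells, cur, false) c = (cells, cur ++ [c], false) := by
  simp [pvAstep, hp, hb]

lemma pvKeyAux : ∀ (n : Nat) (s : List Char), s.length ≤ n → ∀ (cells : List String) (cur : List Char),
    (let st := s.foldl pvAstep (cells, cur, false);
     st.1 ++ [String.ofList (PySem.Chars.strip (if st.2.2 then st.2.1 ++ ['\\'] else st.2.1))])
    = cells ++ (String.ofList (PySem.Chars.strip (cur ++ (pvBtake s).1)) ::
        (match (pvBtake s).2 with | none => [] | some t => pvBcells t)) := by
  intro n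
  induction n with
  | zero =>
    intro s hs cells cur
    have : s = [] := List.length_eq_zero_iff.mp (Nat.le_zero.mp hs)
    subst this; simp [pvBtake]
  | succ n ih =>
    intro s hs cells cur
    match s with
    | [] => simp [pvBtake]
    | '|' :: t =>
      rw [List.foldl_cons, pvAstep_pipe, ih t (by simp at hs; omega)]
      simp only [pvBtake]
      rw [pvBcells_eq t]
      simp
    | '\\' :: [] =>
      simp [pvAstep, pvBtake]
    | '\\' :: c :: t =>
      rw [List.foldl_cons, List.foldl_cons, pvAstep_backslash, pvAstep_escaped,
        ih t (by simp at hs; omega)]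
      simp [pvBtake, List.append_assoc]
    | c :: t =>
      by_cases hp : c = '|'
      · subst hp
        rw [List.foldl_cons, pvAstep_pipe, ih t (by simp at hs; omega)]
        simp only [pvBtake]
        rw [pvBcells_eq t]
        simp
      · by_cases hb : c = '\\'
        · subst hb
          match t with
          | [] => simp [pvAstep, pvBtake]
          | c2 :: t2 =>
            rw [List.foldl_cons, List.foldl_cons, pvAstep_backslash, pvAstep_escaped,
              ih t2 (by simp at hs; omega)]
            simp [pvBtake, List.append_assoc]
        · rw [List.foldl_cons, pvAstep_other _ _ _ hp hb, ih t (by simp at hs; omega)]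
          simp [pvBtake, hb, List.append_assoc]

-- ---------- reduction lemmas for the overlapping matches ----------

lemma pvScan_bs_cons (c : Char) (t : List Char) :
    pvScan ('\\' :: c :: t) = (c :: (pvScan t).1, (pvScan t).2) := rfl

lemma pvScan_cons_ne (c : Char) (t : List Char) (hc : c ≠ '\\') :
    pvScan (c :: t) = (c :: (pvScan t).1, (pvScan t).2) := by
  rw [pvScan.eq_def]; split <;> simp_all

lemma pvUref_bs_cons (c : Char) (t : List Char) : pvUref ('\\' :: c :: t) = c :: pvUref t := rfl

lemma pvUref_cons_ne (c : Char) (t : List Char) (hc : c ≠ '\\') :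
    pvUref (c :: t) = c :: pvUref t := by
  rw [pvUref.eq_def]; split <;> simp_all

lemma pvNfp_bs_cons (c : Char) (t : List Char) : pvNfp ('\\' :: c :: t) = pvNfp t := rfl

lemma pvNfp_cons_ne (c : Char) (t : List Char) (hc : c ≠ '\\') :
    pvNfp (c :: t) = ((c != '|') && pvNfp t) := by
  rw [pvNfp.eq_def]; split <;> simp_all

lemma pvBtake_bs_cons (c : Char) (t : List Char) :
    pvBtake ('\\' :: c :: t) = (c :: (pvBtake t).1, (pvBtake t).2) := rfl

lemma pvBtake_cons_ne (c : Char) (t : List Char) (hp : c ≠ '|') (hb : c ≠ '\\') :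
    pvBtake (c :: t) = (c :: (pvBtake t).1, (pvBtake t).2) := by
  rw [pvBtake.eq_def]; split <;> simp_all

-- ---------- basic facts about the reference scanners ----------

lemma pvUref_eq_scan : ∀ s, pvUref s = (pvScan s).1 ++ (if (pvScan s).2 then ['\\'] else []) := by
  intro s
  fun_induction pvScan s with
  | case1 => rfl
  | case2 => rfl
  | case3 c t r ih =>
    have hr : r = pvScan t := rfl
    simp only [hr]
    rw [pvUref_bs_cons, ih]
    simp
  | case4 c t h1 h2 r ih =>
    have hc : c ≠ '\\' := by
      intro h; cases t with
      | nil => exact (h1 h) rfl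
      | cons a b => exact (h2 a b h) rfl
    have hr : r = pvScan t := rfl
    simp only [hr]
    rw [pvUref_cons_ne c t hc, ih]
    simp

-- straddle lemma: pvScan over an append
lemma pvScan_append : ∀ a b, pvScan (a ++ b) =
    (if (pvScan a).2 then
      (match b with
       | [] => ((pvScan a).1, true)
       | c :: b' => ((pvScan a).1 ++ c :: (pvScan b').1, (pvScan b').2))
     else ((pvScan a).1 ++ (pvScan b).1, (pvScan b).2)) := by
  intro a
  fun_induction pvScan a with
  | case1 => intro b; simp
  | case2 => intro b; cases b <;> rfl
  | case3 c t r ih =>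
    intro b
    have hr : r = pvScan t := rfl
    simp only [hr, List.cons_append, pvScan_bs_cons, ih b]
    cases hb : (pvScan t).2 <;> cases b <;> simp
  | case4 c t h1 h2 r ih =>
    have hc : c ≠ '\\' := by
      intro h; cases t with
      | nil => exact (h1 h) rfl
      | cons a b => exact (h2 a b h) rfl
    intro b
    have hr : r = pvScan t := rfl
    simp only [hr, List.cons_append, pvScan_cons_ne _ _ hc, ih b]
    cases hb : (pvScan t).2 <;> cases b <;> simp

lemma pvScan_pipe_cons (q : List Char) : pvScan ('|' :: q) = ('|' :: (pvScan q).1, (pvScan q).2) := by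
  exact pvScan_cons_ne _ _ (by decide)

-- '|' ∉ p → no free pipe
lemma pvNfp_of_not_mem : ∀ p : List Char, '|' ∉ p → pvNfp p = true := by
  intro p
  fun_induction pvNfp p with
  | case1 => simp
  | case2 => intro _; rfl
  | case3 c t ih => intro h; simp at h; exact ih h.2
  | case4 c t h1 h2 ih =>
    intro h; simp at h
    simp [ih h.2, bne_iff_ne]
    exact Ne.symm h.1

-- nfp is closed under joining at an escaped pipe
lemma pvNfp_append_pipe : ∀ a, pvNfp a = true → (pvScan a).2 = true → ∀ q, '|' ∉ q →
    pvNfp (a ++ '|' :: q) = true := by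
  intro a
  fun_induction pvNfp a with
  | case1 => intro _ h2; simp [pvScan] at h2
  | case2 =>
    intro _ _ q hq
    rw [show ('\\' :: []) ++ '|' :: q = '\\' :: '|' :: q from rfl, pvNfp_bs_cons]
    exact pvNfp_of_not_mem q hq
  | case3 c t ih =>
    intro h1 h2 q hq
    rw [pvScan_bs_cons] at h2
    simpa [pvNfp_bs_cons] using ih h1 h2 q hq
  | case4 c t h1 h2 ih =>
    have hc : c ≠ '\\' := by
      intro h; cases t with
      | nil => exact (h1 h) rfl
      | cons a b => exact (h2 a b h) rfl
    intro ha hs q hq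
    rw [pvScan_cons_ne c t hc] at hs
    simp at ha
    simp only [List.cons_append, pvNfp_cons_ne c _ hc]
    simp [ih ha.2 hs q hq, ha.1]

-- pvBtake on an nfp list finds no pipe and returns pvUref
lemma pvBtake_nfp : ∀ a, pvNfp a = true → pvBtake a = (pvUref a, none) := by
  intro a
  fun_induction pvNfp a with
  | case1 => intro _; rfl
  | case2 => intro _; rfl
  | case3 c t ih =>
    intro h
    simp [pvBtake_bs_cons, pvUref_bs_cons, ih h]
  | case4 c t h1 h2 ih =>
    have hc : c ≠ '\\' := by
      intro h; cases t with
      | nil => exact (h1 h) rfl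
      | cons a b => exact (h2 a b h) rfl
    intro h; simp at h
    simp [pvBtake_cons_ne c t h.1 hc, pvUref_cons_ne c t hc, ih h.2]

-- pvBtake on (nfp ++ '|' :: b)
lemma pvBtake_nfp_pipe : ∀ a, pvNfp a = true → ∀ b, pvBtake (a ++ '|' :: b) =
    (if (pvScan a).2 then ((pvScan a).1 ++ '|' :: (pvBtake b).1, (pvBtake b).2)
     else ((pvScan a).1, some b)) := by
  intro a
  fun_induction pvNfp a with
  | case1 => intro _ b; rfl
  | case2 => intro _ b; simp [pvBtake_bs_cons, pvScan]
  | case3 c t ih =>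
    intro h b
    simp only [List.cons_append, pvBtake_bs_cons, pvScan_bs_cons, ih h b]
    cases (pvScan t).2 <;> simp
  | case4 c t h1 h2 ih =>
    have hc : c ≠ '\\' := by
      intro h; cases t with
      | nil => exact (h1 h) rfl
      | cons a b => exact (h2 a b h) rfl
    intro h b
    simp at h
    simp only [List.cons_append, pvBtake_cons_ne c _ h.1 hc, pvScan_cons_ne c t hc, ih h.2 b]
    cases (pvScan t).2 <;> simp

-- ---------- the trailing-backslash parity equals the scanner's dangling flag ----------

lemma pvCnt_le (t : List Char) : (t.reverse.takeWhile (fun c => c == '\\')).length ≤ t.length := by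
  simpa using (List.takeWhile_sublist (l := t.reverse) (p := fun c => c == '\\')).length_le

lemma pvCnt_cons_ne (c : Char) (t : List Char) (hc : c ≠ '\\') :
    ((c :: t).reverse.takeWhile (fun c => c == '\\')).length
      = (t.reverse.takeWhile (fun c => c == '\\')).length := by
  simp only [List.reverse_cons, List.takeWhile_append]
  split <;> rename_i h
  · simp_all [List.takeWhile_cons, hc]
  · rfl

lemma pvCnt_cons_bs (t : List Char) :
    (('\\' :: t).reverse.takeWhile (fun c => c == '\\')).length
      = (if (t.reverse.takeWhile (fun c => c == '\\')).length = t.length then t.length + 1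
         else (t.reverse.takeWhile (fun c => c == '\\')).length) := by
  simp only [List.reverse_cons, List.takeWhile_append]
  split <;> rename_i h <;> simp_all

lemma pvCnt_parity_two (c : Char) (t : List Char) :
    ((('\\' :: c :: t).reverse.takeWhile (fun c => c == '\\')).length) % 2
      = ((t.reverse.takeWhile (fun c => c == '\\')).length) % 2 := by
  have hle := pvCnt_le t
  by_cases hc : c = '\\'
  · subst hc
    rw [pvCnt_cons_bs ('\\' :: t), pvCnt_cons_bs t]
    simp only [List.length_cons]
    split_ifs <;> omega
  · rw [pvCnt_cons_bs (c :: t), pvCnt_cons_ne c t hc]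
    simp only [List.length_cons]
    split_ifs <;> omega

lemma pvOddTrail_eq_scan : ∀ p, pvOddTrail p = (pvScan p).2 := by
  intro p
  fun_induction pvScan p with
  | case1 => rfl
  | case2 => rfl
  | case3 c t r ih =>
    have hr : r = pvScan t := rfl
    simp only [hr]
    unfold pvOddTrail at ih ⊢
    rw [pvCnt_parity_two c t]
    exact ih
  | case4 c t h1 h2 r ih =>
    have hc : c ≠ '\\' := by
      intro h; cases t with
      | nil => exact (h1 h) rfl
      | cons a b => exact (h2 a b h) rfl
    have hr : r = pvScan t := rfl
    simp only [hr]
    unfold pvOddTrail at ih ⊢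
    rw [pvCnt_cons_ne c t hc]
    exact ih

lemma pvOddTrail_append_pipe (a q : List Char) : pvOddTrail (a ++ '|' :: q) = pvOddTrail q := by
  rw [pvOddTrail_eq_scan, pvOddTrail_eq_scan, pvScan_append, pvScan_pipe_cons]
  cases (pvScan a).2 <;> simp

-- ---------- B's unescape equals the reference unescape ----------

lemma pvSplitOn_bs_cons (c : Char) (t : List Char) :
    (c :: t).splitOn '\\' = if c = '\\' then [] :: t.splitOn '\\'
      else (t.splitOn '\\').modifyHead (List.cons c) := by
  simp [List.splitOn, List.splitOnP_cons]

lemma pvSplitOn_ne_nil (c : Char) (s : List Char) : s.splitOn c ≠ [] := by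
  simp [List.splitOn]; exact List.splitOnP_ne_nil _ s

lemma pvUnesc_eq (s p : List Char) (rest : List (List Char)) (h : s.splitOn '\\' = p :: rest) :
    pvUnesc s = p ++ pvUnescRest rest := by
  simp [pvUnesc, h]

lemma pvUnescRest_pair_nil (t : List Char) (rest : List (List Char)) :
    pvUnescRest ([] :: t :: rest) = ('\\' :: t) ++ pvUnescRest rest := rfl

lemma pvUnescRest_cons_nonempty (x : Char) (xs : List Char) (rest : List (List Char)) :
    pvUnescRest ((x :: xs) :: rest) = (x :: xs) ++ pvUnescRest rest := by
  cases rest with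
  | nil => simp [pvUnescRest]
  | cons r2 rest2 => rfl

lemma pvSplitOn_exists_cons (c : Char) (t : List Char) :
    ∃ p rest, t.splitOn c = p :: rest := by
  cases h : t.splitOn c with
  | nil => exact absurd h (pvSplitOn_ne_nil _ _)
  | cons p rest => exact ⟨p, rest, rfl⟩

lemma pvUnesc_eq_uref_aux : ∀ n (s : List Char), s.length ≤ n →
    pvUnesc s = pvUref s ∧ pvUnescRest (s.splitOn '\\') = pvUref ('\\' :: s) := by
  intro n
  induction n with
  | zero =>
    intro s hs
    have : s = [] := List.length_eq_zero_iff.mp (Nat.le_zero.mp hs)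
    subst this
    exact ⟨by decide, by decide⟩
  | succ n ih =>
    intro s hs
    cases s with
    | nil => exact ⟨by decide, by decide⟩
    | cons c t =>
      have hlen : t.length ≤ n := by simp at hs; omega
      obtain ⟨iha, ihb⟩ := ih t hlen
      obtain ⟨p, rest, hpr⟩ := pvSplitOn_exists_cons '\\' t
      have hUt : pvUnesc t = p ++ pvUnescRest rest := pvUnesc_eq t p rest hpr
      by_cases hc : c = '\\'
      · subst hc
        have hsp : ('\\' :: t).splitOn '\\' = [] :: p :: rest := by
          rw [pvSplitOn_bs_cons]; simp [hpr]
        rw [hpr] at ihb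
        constructor
        · rw [pvUnesc_eq _ _ _ hsp]
          simpa [pvUnescRest_pair_nil] using ihb
        · rw [hsp, pvUnescRest_pair_nil, pvUref_bs_cons, ← iha, hUt]
          rfl
      · have hsp : (c :: t).splitOn '\\' = (c :: p) :: rest := by
          rw [pvSplitOn_bs_cons, if_neg hc, hpr]; rfl
        constructor
        · rw [pvUnesc_eq _ _ _ hsp, pvUref_cons_ne c t hc, ← iha, hUt]
          rfl
        · rw [hsp, pvUnescRest_cons_nonempty, pvUref_bs_cons, ← iha, hUt]
          rfl

lemma pvUnesc_eq_uref (s : List Char) : pvUnesc s = pvUref s :=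
  (pvUnesc_eq_uref_aux s.length s (Nat.le_refl _)).1

-- ---------- merge foldl = merge recursion ----------

lemma pvMerge_foldl_eq : ∀ (ps : List (List Char)) (merged : List (List Char)) (acc : List Char),
    (ps.foldl pvMergeStep (merged ++ [acc], pvOddTrail acc)).1 = merged ++ pvMergeRec acc ps := by
  intro ps
  induction ps with
  | nil => intro merged acc; simp [pvMergeRec]
  | cons q rest ih =>
    intro merged acc
    rw [List.foldl_cons]
    by_cases h : pvOddTrail acc = true
    · have hstep : pvMergeStep (merged ++ [acc], pvOddTrail acc) q
          = (merged ++ [acc ++ '|' :: q], pvOddTrail q) := by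
        simp [pvMergeStep, h]
      rw [hstep, ← pvOddTrail_append_pipe acc q, ih merged (acc ++ '|' :: q)]
      simp [pvMergeRec, h]
    · have h' : pvOddTrail acc = false := by simpa using h
      have hstep : pvMergeStep (merged ++ [acc], pvOddTrail acc) q
          = ((merged ++ [acc]) ++ [q], pvOddTrail q) := by
        simp [pvMergeStep, h']
      rw [hstep, ih (merged ++ [acc]) q]
      simp [pvMergeRec, h']

-- ---------- intercalate helpers ----------

lemma pvIntercalate_singleton (a : List Char) : List.intercalate ['|'] [a] = a := by
  simp [List.intercalate]

lemma pvIntercalate_cons_cons (a b : List Char) (l : List (List Char)) :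
    List.intercalate ['|'] (a :: b :: l) = a ++ '|' :: List.intercalate ['|'] (b :: l) := by
  simp [List.intercalate, List.intersperse]

-- every piece of splitOn '|' is pipe-free
lemma pvSplitOn_pipe_free : ∀ (n : Nat) (s : List Char), s.length ≤ n →
    ∀ q ∈ s.splitOn '|', '|' ∉ q := by
  intro n
  induction n with
  | zero =>
    intro s hs
    have : s = [] := List.length_eq_zero_iff.mp (Nat.le_zero.mp hs)
    subst this
    intro q hq
    simp [List.splitOn, List.splitOnP_nil] at hq
    simp [hq]
  | succ n ih =>
    intro s hs q hq
    match s with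
    | [] =>
      simp [List.splitOn, List.splitOnP_nil] at hq
      simp [hq]
    | c :: t =>
      by_cases hc : c = '|'
      · subst hc
        rw [show ('|' :: t).splitOn '|' = [] :: t.splitOn '|' by
          simp [List.splitOn, List.splitOnP_cons]] at hq
        simp only [List.mem_cons] at hq
        rcases hq with hq | hq
        · simp [hq]  -- q = []
        · exact ih t (by simp at hs; omega) q hq
      · rw [show (c :: t).splitOn '|' = (t.splitOn '|').modifyHead (List.cons c) by
          simp [List.splitOn, List.splitOnP_cons, hc]] at hq
        obtain ⟨p, rest, hpr⟩ : ∃ p rest, t.splitOn '|' = p :: rest := by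
          cases h : t.splitOn '|' with
          | nil => exact absurd h (pvSplitOn_ne_nil _ _)
          | cons p rest => exact ⟨p, rest, rfl⟩
        rw [hpr] at hq
        simp at hq
        rcases hq with hq | hq
        · subst hq
          have hp : '|' ∉ p := ih t (by simp at hs; omega) p (by rw [hpr]; simp)
          simp [hp]
          exact fun e => hc e.symm
        · exact ih t (by simp at hs; omega) q (by rw [hpr]; simp [hq])

-- ---------- the heart: merged cells, unescaped, are A's cells ----------

lemma pvMain : ∀ (ps : List (List Char)) (acc : List Char),
    (∀ q ∈ ps, '|' ∉ q) → pvNfp acc = true →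
    (pvMergeRec acc ps).map (fun cell => String.ofList (PySem.Chars.strip (pvUnesc cell)))
      = pvBcells (List.intercalate ['|'] (acc :: ps)) := by
  intro ps
  induction ps with
  | nil =>
    intro acc _ hacc
    rw [pvMergeRec, pvIntercalate_singleton, pvBcells_eq, pvBtake_nfp acc hacc]
    simp [pvUnesc_eq_uref]
  | cons q rest ih =>
    intro acc hps hacc
    have hq : '|' ∉ q := hps q (by simp)
    have hrest : ∀ r ∈ rest, '|' ∉ r := fun r hr => hps r (by simp [hr])
    rw [pvIntercalate_cons_cons]
    by_cases h : pvOddTrail acc = true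
    · have hscan : (pvScan acc).2 = true := by rw [← pvOddTrail_eq_scan]; exact h
      have hacc' : pvNfp (acc ++ '|' :: q) = true := pvNfp_append_pipe acc hacc hscan q hq
      rw [pvMergeRec]
      simp only [h, if_true]
      rw [ih (acc ++ '|' :: q) hrest hacc']
      congr 1
      cases rest with
      | nil => rw [pvIntercalate_singleton, pvIntercalate_singleton]
      | cons r rs => rw [pvIntercalate_cons_cons, pvIntercalate_cons_cons]; simp
    · have h' : pvOddTrail acc = false := by simpa using h
      have hscan : (pvScan acc).2 = false := by rw [← pvOddTrail_eq_scan]; exact h'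
      rw [pvMergeRec]
      simp only [h', if_false, Bool.false_eq_true]
      rw [List.map_cons, ih q hrest (pvNfp_of_not_mem q hq)]
      rw [pvBcells_eq (acc ++ '|' :: List.intercalate ['|'] (q :: rest)),
        pvBtake_nfp_pipe acc hacc _, hscan]
      simp only [if_false, Bool.false_eq_true]
      have : pvUnesc acc = (pvScan acc).1 := by
        rw [pvUnesc_eq_uref, pvUref_eq_scan, hscan]; simp
      rw [this]

-- ===== VERDICT (by name: the statement is the Claim_ definition above) =====
theorem split_markdown_row_py_spec : Claim_equal_split_markdown_row_py := by
  intro row _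
  unfold Spec_split_markdown_row_py split_markdown_row_py split_markdown_row_py_alt
  simp only []
  split
  · rfl
  · set r2 := (if PySem.Chars.endswith (PySem.List.slice (PySem.Chars.strip row.toList) (some 1) none) ['|']
      then PySem.List.slice (PySem.List.slice (PySem.Chars.strip row.toList) (some 1) none) none (some (-1))
      else PySem.List.slice (PySem.Chars.strip row.toList) (some 1) none) with hr2
    -- A side
    rw [pvKeyAux r2.length r2 (Nat.le_refl _)]
    simp only [List.nil_append]
    rw [← pvBcells_eq r2]
    -- B side
    obtain ⟨p, ps, hpp⟩ : ∃ p ps, r2.splitOn '|' = p :: ps := by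
      cases h : r2.splitOn '|' with
      | nil => exact absurd h (pvSplitOn_ne_nil _ _)
      | cons p ps => exact ⟨p, ps, rfl⟩
    have hfree := pvSplitOn_pipe_free r2.length r2 (Nat.le_refl _)
    rw [hpp] at hfree
    have hfirst : pvMergeStep ([], false) p = ([] ++ [p], pvOddTrail p) := by
      simp [pvMergeStep]
    rw [hpp, List.foldl_cons, hfirst, pvMerge_foldl_eq ps [] p, List.nil_append]
    rw [pvMain ps p (fun q hq => hfree q (by simp [hq])) (pvNfp_of_not_mem p (hfree p (by simp)))]
    have := List.intercalate_splitOn r2 '|'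
    rw [hpp] at this
    rw [this]
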